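-- pv_equiv track=rewrite | github.com/vosalo/groupsubs | substitutive_groups.py | has_doubles
-- ===== SOURCE A (Python) =====
-- def outs(node, edges):
--     for e in edges:
--         if e[0] == node:
--             yield e
--
-- def ins(node, edges):
--     for e in edges:
--         if e[1] == node:
--             yield e
--
-- def get_nodes(edges):
--     ns = set()
--     for e in edges:
--         ns.add(e[0])
--         ns.add(e[1])
--     return ns
--
-- def has_doubles(graph):
--     nodes = get_nodes(graph)
--     for n in nodes:
--         for o in outs(n, graph):
--             for p in outs(n, graph):
--                 if o[2] == p[2]:
--                     if o != p:
--                         return True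
--         for o in ins(n, graph):
--             for p in ins(n, graph):
--                 if o[2] == p[2]:
--                     if o != p:
--                         return True
--     return False
-- ===== SOURCE B (Python) =====
-- def has_doubles(graph):
--     # One pass over the distinct edges, hashing by (source,label) and (target,label):
--     # a key collision between two distinct edges is exactly a "double".
--     out_seen = set()
--     in_seen = set()
--     for e in dict.fromkeys(graph):
--         if (e[0], e[2]) in out_seen or (e[1], e[2]) in in_seen:
--             return True
--         out_seen.add((e[0], e[2]))
--         in_seen.add((e[1], e[2]))
--     return False
-- ===== Notes on version B (the rewrite author's own statement) =====
-- stated objective: faster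
-- what changed: Replaced the per-node double scan of all edge pairs by a single pass over the distinct edges that hashes each edge by its (source,label) and (target,label) keys and reports a key collision.
import Mathlib
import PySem

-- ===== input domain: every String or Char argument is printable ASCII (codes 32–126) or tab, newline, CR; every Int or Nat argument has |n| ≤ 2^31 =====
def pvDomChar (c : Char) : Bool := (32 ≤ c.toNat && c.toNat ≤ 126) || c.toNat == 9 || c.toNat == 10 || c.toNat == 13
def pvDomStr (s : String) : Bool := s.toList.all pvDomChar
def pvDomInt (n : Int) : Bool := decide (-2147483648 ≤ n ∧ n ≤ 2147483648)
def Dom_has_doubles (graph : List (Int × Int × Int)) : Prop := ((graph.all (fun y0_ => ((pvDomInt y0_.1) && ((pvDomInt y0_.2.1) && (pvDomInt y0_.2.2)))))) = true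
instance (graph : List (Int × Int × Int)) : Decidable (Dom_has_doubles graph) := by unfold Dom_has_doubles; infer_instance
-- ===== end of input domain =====

-- B replaces A's per-node scan over all edge pairs by one pass over the distinct
-- edges hashing each by its (source,label) and (target,label) keys (objective: faster).

-- ===== PORT A =====
-- outs(node, edges): edges leaving `node`
def pvOuts (node : Int) (edges : List (Int × Int × Int)) : List (Int × Int × Int) :=
  edges.filter (fun e => e.1 == node)

-- ins(node, edges): edges entering `node`
def pvIns (node : Int) (edges : List (Int × Int × Int)) : List (Int × Int × Int) :=
  edges.filter (fun e => e.2.1 == node)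

-- get_nodes(edges): set of endpoints
def pvGetNodes (edges : List (Int × Int × Int)) : PySem.Set Int :=
  edges.foldl (fun s e => PySem.Set.add (PySem.Set.add s e.1) e.2.1) PySem.Set.empty

-- the double for-loop with early `return True`
def pvPairDouble (l : List (Int × Int × Int)) : Bool :=
  l.any (fun o => l.any (fun p => o.2.2 == p.2.2 && !(o == p)))

def has_doubles (graph : List (Int × Int × Int)) : Bool :=
  (pvGetNodes graph).any (fun n =>
    pvPairDouble (pvOuts n graph) || pvPairDouble (pvIns n graph))

-- ===== PORT B =====
-- the for-loop of Source B: two seen-sets, early `return True` on a key collision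
def pvAltGo : List (Int × Int × Int) → PySem.Set (Int × Int) → PySem.Set (Int × Int) → Bool
  | [], _, _ => false
  | e :: rest, outSeen, inSeen =>
    if PySem.Set.contains outSeen (e.1, e.2.2) || PySem.Set.contains inSeen (e.2.1, e.2.2) then
      true
    else
      pvAltGo rest (PySem.Set.add outSeen (e.1, e.2.2)) (PySem.Set.add inSeen (e.2.1, e.2.2))

def has_doubles_alt (graph : List (Int × Int × Int)) : Bool :=
  pvAltGo (PySem.List.dedup graph) PySem.Set.empty PySem.Set.empty

-- ===== PRECONDITION & SPEC =====
def Spec_has_doubles (graph : List (Int × Int × Int)) (out : Bool) : Prop := out = has_doubles_alt graph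
instance (graph : List (Int × Int × Int)) (out : Bool) : Decidable (Spec_has_doubles graph out) := by unfold Spec_has_doubles; infer_instance

-- ===== CLAIM (what is proved, stated in full; the proofs are below) =====
def Claim_equal_has_doubles : Prop := ∀ (graph : List (Int × Int × Int)), Dom_has_doubles graph → Spec_has_doubles graph (has_doubles graph)

-- ===== LEMMAS AND PROOFS =====

-- two distinct edges collide: same label and (same source or same target)
def pvColl (e f : Int × Int × Int) : Prop :=
  (e.1 = f.1 ∨ e.2.1 = f.2.1) ∧ e.2.2 = f.2.2

-- the common characterisation of both programs
def pvHasD (graph : List (Int × Int × Int)) : Prop :=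
  ∃ e ∈ graph, ∃ f ∈ graph, e ≠ f ∧ pvColl e f

lemma pvMem_getNodes (edges : List (Int × Int × Int)) (s : PySem.Set Int) (x : Int) :
    x ∈ edges.foldl (fun s e => PySem.Set.add (PySem.Set.add s e.1) e.2.1) s ↔
      x ∈ s ∨ ∃ e ∈ edges, x = e.1 ∨ x = e.2.1 := by
  induction edges generalizing s with
  | nil => simp
  | cons e rest ih =>
    simp [List.foldl_cons, ih, PySem.Set.mem_add, or_assoc]

lemma pvPairDouble_iff (l : List (Int × Int × Int)) :
    pvPairDouble l = true ↔ ∃ o ∈ l, ∃ p ∈ l, o.2.2 = p.2.2 ∧ o ≠ p := by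
  simp [pvPairDouble]

lemma pvA_iff (graph : List (Int × Int × Int)) :
    has_doubles graph = true ↔ pvHasD graph := by
  constructor
  · intro h
    simp only [has_doubles, List.any_eq_true, Bool.or_eq_true] at h
    obtain ⟨n, _, h⟩ := h
    rcases h with h | h <;>
    · rw [pvPairDouble_iff] at h
      obtain ⟨o, ho, p, hp, hl, hne⟩ := h
      simp only [pvOuts, pvIns, List.mem_filter, beq_iff_eq] at ho hp
      exact ⟨o, ho.1, p, hp.1, hne, by simp [pvColl, ho.2, hp.2, hl]⟩
  · rintro ⟨e, he, f, hf, hne, hsrc, hlab⟩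
    simp only [has_doubles, List.any_eq_true, Bool.or_eq_true]
    rcases hsrc with hs | hs
    · refine ⟨e.1, ?_, Or.inl ?_⟩
      · exact (pvMem_getNodes graph PySem.Set.empty e.1).mpr (Or.inr ⟨e, he, Or.inl rfl⟩)
      · exact (pvPairDouble_iff _).mpr
          ⟨e, by simp [pvOuts, he], f, by simp [pvOuts, hf, hs], hlab, hne⟩
    · refine ⟨e.2.1, ?_, Or.inr ?_⟩
      · exact (pvMem_getNodes graph PySem.Set.empty e.2.1).mpr (Or.inr ⟨e, he, Or.inr rfl⟩)
      · exact (pvPairDouble_iff _).mpr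
          ⟨e, by simp [pvIns, he], f, by simp [pvIns, hf, hs], hlab, hne⟩

-- keys of an edge
def pvK1 (e : Int × Int × Int) : Int × Int := (e.1, e.2.2)
def pvK2 (e : Int × Int × Int) : Int × Int := (e.2.1, e.2.2)

lemma pvColl_iff_keys (e f : Int × Int × Int) :
    pvColl e f ↔ pvK1 e = pvK1 f ∨ pvK2 e = pvK2 f := by
  simp [pvColl, pvK1, pvK2, Prod.ext_iff]
  tauto

-- loop invariant for B's pass
lemma pvAltGo_false_iff (l : List (Int × Int × Int))
    (so si : PySem.Set (Int × Int)) :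
    pvAltGo l so si = false ↔
      (∀ e ∈ l, pvK1 e ∉ so ∧ pvK2 e ∉ si) ∧
        l.Pairwise (fun e f => pvK1 e ≠ pvK1 f ∧ pvK2 e ≠ pvK2 f) := by
  induction l generalizing so si with
  | nil => simp [pvAltGo]
  | cons e rest ih =>
    cases hhit : (PySem.Set.contains so (e.1, e.2.2) ||
        PySem.Set.contains si (e.2.1, e.2.2)) with
    | true =>
      simp only [pvAltGo, hhit, if_true, Bool.true_eq_false, false_iff, not_and]
      rw [Bool.or_eq_true, PySem.Set.contains_iff, PySem.Set.contains_iff] at hhit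
      intro hfresh
      have := hfresh e List.mem_cons_self
      simp only [pvK1, pvK2] at this
      exact absurd hhit (by tauto)
    | false =>
      have hhit' : (e.1, e.2.2) ∉ so ∧ (e.2.1, e.2.2) ∉ si := by
        simpa using hhit
      simp only [pvAltGo, hhit, Bool.false_eq_true, if_false, ih, List.pairwise_cons,
        List.forall_mem_cons]
      constructor
      · rintro ⟨hfresh, hpw⟩
        refine ⟨⟨⟨hhit'.1, hhit'.2⟩, fun f hf => ?_⟩, fun f hf => ?_, hpw⟩
        · have := hfresh f hf
          simp only [PySem.Set.mem_add, not_or] at this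
          exact ⟨this.1.1, this.2.1⟩
        · have := hfresh f hf
          simp only [PySem.Set.mem_add, not_or, pvK1, pvK2] at this ⊢
          exact ⟨fun h => this.1.2 h.symm, fun h => this.2.2 h.symm⟩
      · rintro ⟨⟨-, hfresh⟩, hkeys, hpw⟩
        refine ⟨fun f hf => ?_, hpw⟩
        have h1 := hfresh f hf
        have h2 := hkeys f hf
        simp only [PySem.Set.mem_add, not_or, pvK1, pvK2] at h1 h2 ⊢
        exact ⟨⟨h1.1, fun h => h2.1 h.symm⟩, ⟨h1.2, fun h => h2.2 h.symm⟩⟩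

lemma pvB_iff (graph : List (Int × Int × Int)) :
    has_doubles_alt graph = true ↔ pvHasD graph := by
  have hd : PySem.List.dedup graph = PySem.Set.ofList graph := by
    simp [PySem.List.dedup_eq_ofList]
  have hmem : ∀ x, x ∈ PySem.List.dedup graph ↔ x ∈ graph := by
    intro x; rw [hd]; exact PySem.Set.mem_ofList graph x
  have hnd : (PySem.List.dedup graph).Nodup := by
    rw [hd]; exact PySem.Set.nodup_ofList graph
  rw [show (has_doubles_alt graph = true) ↔
        ¬ (pvAltGo (PySem.List.dedup graph) PySem.Set.empty PySem.Set.empty = false) by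
      simp [has_doubles_alt]]
  rw [pvAltGo_false_iff]
  have hempty : ∀ e ∈ PySem.List.dedup graph,
      pvK1 e ∉ (PySem.Set.empty : PySem.Set (Int × Int)) ∧
      pvK2 e ∉ (PySem.Set.empty : PySem.Set (Int × Int)) := by
    intro e _; exact ⟨by simp [PySem.Set.empty], by simp [PySem.Set.empty]⟩
  constructor
  · intro h
    have hnp : ¬ (PySem.List.dedup graph).Pairwise
        (fun e f => pvK1 e ≠ pvK1 f ∧ pvK2 e ≠ pvK2 f) := fun hpw => h ⟨hempty, hpw⟩
    rw [List.pairwise_iff_forall_sublist] at hnp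
    push Not at hnp
    obtain ⟨a, b, hsub, hcoll⟩ := hnp
    have ha : a ∈ graph := (hmem a).mp (hsub.subset (by simp))
    have hb : b ∈ graph := (hmem b).mp (hsub.subset (by simp))
    have hab : a ≠ b := by
      have : ([a, b] : List _).Nodup := hsub.nodup hnd
      simp at this; exact this
    refine ⟨a, ha, b, hb, hab, (pvColl_iff_keys a b).mpr ?_⟩
    by_cases h1 : pvK1 a = pvK1 b
    · exact Or.inl h1
    · exact Or.inr (hcoll h1)
  · rintro ⟨e, he, f, hf, hne, hc⟩ ⟨-, hpw⟩
    have hsymm : Symmetric (fun e f : Int × Int × Int => pvK1 e ≠ pvK1 f ∧ pvK2 e ≠ pvK2 f) := by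
      intro a b h; exact ⟨fun hh => h.1 hh.symm, fun hh => h.2 hh.symm⟩
    have := hpw.forall hsymm ((hmem e).mpr he) ((hmem f).mpr hf) hne
    rcases (pvColl_iff_keys e f).mp hc with h | h
    · exact this.1 h
    · exact this.2 h

-- ===== VERDICT (by name: the statement is the Claim_ definition above) =====
theorem has_doubles_spec : Claim_equal_has_doubles := by
  intro graph _
  unfold Spec_has_doubles
  have ha := pvA_iff graph
  have hb := pvB_iff graph
  cases h1 : has_doubles graph <;> cases h2 : has_doubles_alt graph <;>
    simp_all
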